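-- pv_equiv track=rewrite | github.com/HmonWutt/AoC2023 | day13_solution.py | check_if_reflection
-- ===== SOURCE A (Python) =====
-- def check_if_reflection(current,next,file):
--     count = 0
--
--     while current-1 >=0 and next+1 <= len(file)-1:
--         if file[current-1] != file[next+1]:
--             return  False
--         else:
--             current -=1
--             next +=1
--             count+=1
--     return True
-- ===== SOURCE B (Python) =====
-- def check_if_reflection(current, next, file):
--     k = min(current, len(file) - 1 - next)
--     if k <= 0:
--         return True
--     return file[current - k:current][::-1] == file[next + 1:next + 1 + k]
-- ===== Notes on version B (the rewrite author's own statement) =====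
-- stated objective: simpler
-- what changed: Replaces the outward-expanding while loop with a closed-form extent k = min(current, len(file)-1-next) followed by a single slice-equality comparison of the reversed left block against the right block.
-- outside the precondition, e.g. on check_if_reflection(1, -2, ['a', 'b', 'a']): A returns True, B returns False; on check_if_reflection(4, 0, ['a', 'b']): A raises IndexError, B returns False
import Mathlib
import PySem

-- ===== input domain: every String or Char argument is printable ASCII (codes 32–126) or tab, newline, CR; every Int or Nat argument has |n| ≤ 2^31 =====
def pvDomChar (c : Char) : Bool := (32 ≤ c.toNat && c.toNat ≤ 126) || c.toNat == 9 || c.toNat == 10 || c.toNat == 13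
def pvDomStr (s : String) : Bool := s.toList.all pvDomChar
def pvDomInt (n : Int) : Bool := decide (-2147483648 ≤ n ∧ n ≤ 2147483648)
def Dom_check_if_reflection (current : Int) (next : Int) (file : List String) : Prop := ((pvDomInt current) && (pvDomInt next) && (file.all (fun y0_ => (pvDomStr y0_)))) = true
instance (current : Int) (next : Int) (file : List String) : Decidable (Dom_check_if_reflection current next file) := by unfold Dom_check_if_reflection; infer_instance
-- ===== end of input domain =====

-- B replaces A's outward-expanding while loop by a closed-form extent k followed by one
-- reversed-slice equality comparison (objective: simpler decomposition, same cost).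


-- ===== PORT A =====
-- the while loop of A; `count` is A's (dead) counter, kept for faithfulness.
-- `pyGet? = none` is Python's IndexError; excluded by Pre_, the port returns false there.
def pvA_loop (current : Int) (next : Int) (file : List String) (count : Int) : Bool :=
  if _h : 0 ≤ current - 1 ∧ next + 1 ≤ (file.length : Int) - 1 then
    match PySem.List.pyGet? file (current - 1), PySem.List.pyGet? file (next + 1) with
    | some a, some b =>
        if a ≠ b then false
        else pvA_loop (current - 1) (next + 1) file (count + 1)
    | _, _ => false
  else true
termination_by current.toNat
decreasing_by omega

def check_if_reflection (current : Int) (next : Int) (file : List String) : Bool :=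
  pvA_loop current next file 0

-- ===== PORT B =====
-- `[::-1]` is ported as List.reverse (PySem.List.slice?_none_none_neg_one).
def check_if_reflection_alt (current : Int) (next : Int) (file : List String) : Bool :=
  let k := min current ((file.length : Int) - 1 - next)
  if k ≤ 0 then true
  else (PySem.List.slice file (some (current - k)) (some current)).reverse
         == PySem.List.slice file (some (next + 1)) (some (next + 1 + k))

-- ===== PRECONDITION & SPEC =====
-- Pre_ excludes inputs whose expanding walk touches an out-of-range row index: beyond the
-- list A raises IndexError, and a negative next makes A compare wrapped-around rows — an
-- accident of Python negative indexing on inputs outside the puzzle's 0 ≤ current ≤ next domain.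
def Pre_check_if_reflection (current : Int) (next : Int) (file : List String) : Prop :=
  (1 ≤ current ∧ next + 1 ≤ (file.length : Int) - 1) →
    (current ≤ (file.length : Int) ∧ 0 ≤ next + 1)
instance (current : Int) (next : Int) (file : List String) : Decidable (Pre_check_if_reflection current next file) := by unfold Pre_check_if_reflection; infer_instance

def pvWitness_check_if_reflection : Int × Int × List String := (1, 1, ["ab", "cd", "ab"])

def Spec_check_if_reflection (current : Int) (next : Int) (file : List String) (out : Bool) : Prop := out = check_if_reflection_alt current next file
instance (current : Int) (next : Int) (file : List String) (out : Bool) : Decidable (Spec_check_if_reflection current next file out) := by unfold Spec_check_if_reflection; infer_instance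

-- ===== CLAIM (what is proved, stated in full; the proofs are below) =====
def Claim_equal_check_if_reflection : Prop := ∀ (current : Int) (next : Int) (file : List String), Dom_check_if_reflection current next file → Pre_check_if_reflection current next file → Spec_check_if_reflection current next file (check_if_reflection current next file)

-- ===== LEMMAS AND PROOFS =====


-- block comparison both sides reduce to: reversed k-row block before a vs k-row block from b
def pvBlk (file : List String) (a b k : Nat) : Bool :=
  ((file.drop a).take k).reverse == (file.drop b).take k

theorem pvBlk_zero (file : List String) (a b : Nat) : pvBlk file a b 0 = true := by
  simp [pvBlk]

theorem pvBlk_succ (file : List String) (a b k : Nat)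
    (ha : a + k < file.length) (hb : b < file.length) :
    pvBlk file a b (k + 1) = ((file[a + k] == file[b]) && pvBlk file a (b + 1) k) := by
  unfold pvBlk
  have hk : k < (file.drop a).length := by simp; omega
  rw [List.take_add_one, List.getElem?_eq_getElem hk, List.getElem_drop,
    List.drop_eq_getElem_cons hb, List.take_succ_cons]
  simp [List.cons_beq_cons]

-- B in the loop-entered region, written over Nat blocks
theorem pv_alt_blk (c : Nat) (next : Int) (file : List String)
    (h1 : 1 ≤ (c : Int)) (hc : (c : Int) ≤ file.length)
    (hn : 0 ≤ next + 1) (hg : next + 1 ≤ (file.length : Int) - 1) :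
    check_if_reflection_alt (c : Int) next file =
      pvBlk file (c - (min (c : Int) ((file.length : Int) - 1 - next)).toNat)
        (next + 1).toNat (min (c : Int) ((file.length : Int) - 1 - next)).toNat := by
  unfold check_if_reflection_alt pvBlk
  set k : Int := min (c : Int) ((file.length : Int) - 1 - next) with hk
  have hk1 : 1 ≤ k := by omega
  rw [if_neg (by omega)]
  rw [PySem.List.slice_toNat file (by omega) (by omega),
    PySem.List.slice_toNat file (by omega) (by omega)]
  have e1 : ((c : Int) - k).toNat = c - k.toNat := by omega
  have e2 : ((c : Int)).toNat = c := by omega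
  have e3 : (next + 1 + k).toNat - (next + 1).toNat = k.toNat := by omega
  have e4 : c - (c - k.toNat) = k.toNat := by omega
  rw [e1, e2, e3, e4]

theorem pv_main (c : Nat) : ∀ (next count : Int) (file : List String),
    (c : Int) ≤ file.length → 0 ≤ next + 1 →
    pvA_loop (c : Int) next file count = check_if_reflection_alt (c : Int) next file := by
  induction c with
  | zero =>
    intro next count file _ _
    rw [pvA_loop, dif_neg (by omega)]
    unfold check_if_reflection_alt
    rw [if_pos (by omega)]
  | succ c ih =>
    intro next count file h1 h2
    rw [pvA_loop]
    by_cases hg : next + 1 ≤ (file.length : Int) - 1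
    · rw [dif_pos (by omega)]
      have hcl : c < file.length := by omega
      have hnl : (next + 1).toNat < file.length := by omega
      have ec : ((c + 1 : Nat) : Int) - 1 = ((c : Nat) : Int) := by push_cast; ring
      have en : next + 1 = (((next + 1).toNat : Nat) : Int) := by omega
      rw [ec, en, PySem.List.pyGet?_natCast file c,
        PySem.List.pyGet?_natCast file (next + 1).toNat,
        List.getElem?_eq_getElem hcl, List.getElem?_eq_getElem hnl]
      rw [← en]
      simp only []
      push_cast
      set k : Int := min ((c : Int) + 1) ((file.length : Int) - 1 - next) with hkdef
      have hk1 : 1 ≤ k := by omega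
      have hkc : k.toNat ≤ c + 1 := by omega
      obtain ⟨j, hj⟩ : ∃ j, k.toNat = j + 1 := ⟨k.toNat - 1, by omega⟩
      have hbig : check_if_reflection_alt ((c : Int) + 1) next file =
          pvBlk file (c + 1 - k.toNat) (next + 1).toNat k.toNat := by
        have := pv_alt_blk (c + 1) next file (by push_cast; omega) (by push_cast; omega) h2 hg
        push_cast at this
        rw [this]
      have hblk : pvBlk file (c + 1 - k.toNat) (next + 1).toNat k.toNat =
          ((file[c] == file[(next + 1).toNat]) &&
            pvBlk file (c + 1 - k.toNat) ((next + 1).toNat + 1) (k.toNat - 1)) := by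
        rw [hj, pvBlk_succ file _ _ _ (by omega) hnl]
        have e2 : c + 1 - (j + 1) + j = c := by omega
        have e3 : j + 1 - 1 = j := by omega
        simp only [e2, e3]
      by_cases heq : file[c] = file[(next + 1).toNat]
      · rw [if_neg (not_not_intro heq)]
        rw [ih (next + 1) (count + 1) file (by omega) (by omega)]
        rw [hbig, hblk, heq, beq_self_eq_true, Bool.true_and]
        by_cases hk2 : k = 1
        · unfold check_if_reflection_alt
          rw [if_pos (by omega)]
          have e0 : k.toNat - 1 = 0 := by omega
          rw [e0, pvBlk_zero]
        · have halt := pv_alt_blk c (next + 1) file (by omega) (by omega) (by omega) (by omega)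
          rw [halt]
          have ek : min ((c : Int)) ((file.length : Int) - 1 - (next + 1)) = k - 1 := by omega
          rw [ek]
          have e5 : c - (k - 1).toNat = c + 1 - k.toNat := by omega
          have e6 : (next + 1 + 1).toNat = (next + 1).toNat + 1 := by omega
          have e7 : (k - 1).toNat = k.toNat - 1 := by omega
          rw [e5, e6, e7]
      · rw [if_pos heq]
        rw [hbig, hblk]
        have hb : (file[c] == file[(next + 1).toNat]) = false := by simp [heq]
        rw [hb, Bool.false_and]
    · rw [dif_neg (by omega)]
      unfold check_if_reflection_alt
      rw [if_pos (by omega)]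

-- ===== VERDICT (by name: the statement is the Claim_ definition above) =====
theorem check_if_reflection_spec : Claim_equal_check_if_reflection := by
  intro current next file _ hpre
  unfold Spec_check_if_reflection check_if_reflection
  by_cases h : 1 ≤ current ∧ next + 1 ≤ (file.length : Int) - 1
  · obtain ⟨hcl, hn⟩ := hpre h
    have hc0 : 0 ≤ current := by omega
    have := pv_main current.toNat next 0 file (by omega) (by omega)
    rwa [Int.toNat_of_nonneg hc0] at this
  · unfold pvA_loop check_if_reflection_alt
    rw [dif_neg (by omega)]
    simp only []
    rw [if_pos (by omega)]
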